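-- pv_equiv track=rewrite | github.com/DongGeun974/computingThinking | week01/2628.py | divDist
-- ===== SOURCE A (Python) =====
-- def divDist(line, distance):
--     result = distance
--
--     targetIDX = 0
--     length = 0
--     for i in range(len(distance)):
--         if sum(distance[:i+1]) > line:
--             length = sum(distance[:i+1])
--             break
--         else:
--             targetIDX = targetIDX+1
--
--     result.insert(targetIDX, length - line)
--     result.insert(targetIDX, result[targetIDX+1] - result[targetIDX])
--
--     del result[targetIDX + 2]
--
--     return result
-- ===== SOURCE B (Python) =====
-- def divDist(line, distance):
--     # One pass with a running prefix sum: at the first index k where the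
--     # prefix sum exceeds line, split distance[k] into the part up to line
--     # and the remainder, returning a new list (does not mutate distance).
--     pre = 0
--     for k in range(len(distance)):
--         d = distance[k]
--         if pre + d > line:
--             return distance[:k] + [line - pre, pre + d - line] + distance[k + 1:]
--         pre += d
--     return []
-- ===== Notes on version B (the rewrite author's own statement) =====
-- stated objective: simpler
-- what changed: B maintains a running prefix sum and returns the answer directly with one slice-splice at the first crossing index, instead of A's loop that re-sums the whole prefix slice at every step and then edits the list in place via two inserts and a delete.
import Mathlib
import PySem

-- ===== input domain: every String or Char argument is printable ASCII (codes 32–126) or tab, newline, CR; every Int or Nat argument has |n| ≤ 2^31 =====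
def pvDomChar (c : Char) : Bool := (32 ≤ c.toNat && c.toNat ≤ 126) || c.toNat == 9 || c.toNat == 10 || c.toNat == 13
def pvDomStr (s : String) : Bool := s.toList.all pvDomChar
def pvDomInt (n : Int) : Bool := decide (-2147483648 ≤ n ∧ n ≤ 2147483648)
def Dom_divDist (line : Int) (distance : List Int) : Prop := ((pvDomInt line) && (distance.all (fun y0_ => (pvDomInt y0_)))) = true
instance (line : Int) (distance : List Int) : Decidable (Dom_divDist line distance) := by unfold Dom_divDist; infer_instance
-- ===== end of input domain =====

-- B replaces A's loop that re-sums the prefix slice at every step (and then edits the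
-- list with two inserts and a delete) by a single pass with a running prefix sum that
-- splices the split element in directly (objective: simpler).
-- A mutates `distance` in place (insert/del on the alias `result`); B does not —
-- the equivalence proved here is about the RETURN value only.

-- ===== PORT A =====
-- the `for i in range(len(distance))` loop with its break; state = (i, targetIDX)
def divDistLoop (line : Int) (distance : List Int) (i : Nat) (targetIDX : Nat) : Nat × Int :=
  if i < distance.length then
    if line < (distance.take (i+1)).sum then (targetIDX, (distance.take (i+1)).sum)
    else divDistLoop line distance (i+1) (targetIDX+1)
  else (targetIDX, 0)
termination_by distance.length - i

-- the straight-line code after the loop: two inserts and `del result[targetIDX+2]`;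
-- the `result[...]` reads and the `del` raise IndexError exactly where pyGet?/pop? are none
def divDistBuild (line : Int) (targetIDX : Nat) (length : Int) (result : List Int) : List Int :=
  match PySem.List.pyGet? (PySem.List.insert result (targetIDX : Int) (length - line)) ((targetIDX : Int) + 1),
        PySem.List.pyGet? (PySem.List.insert result (targetIDX : Int) (length - line)) (targetIDX : Int) with
  | some a, some b =>
      match PySem.List.pop? (PySem.List.insert (PySem.List.insert result (targetIDX : Int) (length - line)) (targetIDX : Int) (a - b)) ((targetIDX : Int) + 2) with
      | some pr => pr.2
      | none => []
  | _, _ => []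

def divDist (line : Int) (distance : List Int) : List Int :=
  let r := divDistLoop line distance 0 0
  divDistBuild line r.1 r.2 distance

-- ===== PORT B =====
-- Source B's index loop with running prefix sum; the slices distance[:k] / distance[k+1:]
-- are List.take k / List.drop (k+1) exactly (nonnegative slice bounds)
def divDistAltGo (line : Int) (distance : List Int) (pre : Int) (k : Nat) : List Int :=
  if h : k < distance.length then
    let d := distance[k]
    if line < pre + d then
      distance.take k ++ [line - pre, pre + d - line] ++ distance.drop (k+1)
    else divDistAltGo line distance (pre + d) (k+1)
  else []
termination_by distance.length - k

def divDist_alt (line : Int) (distance : List Int) : List Int :=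
  divDistAltGo line distance 0 0

-- ===== PRECONDITION & SPEC =====
-- A raises IndexError exactly when no prefix sum of distance exceeds line (then
-- targetIDX runs past the end and result[targetIDX+1] is out of range); Pre_ admits
-- every input on which A returns normally.
def Pre_divDist (line : Int) (distance : List Int) : Prop :=
  ∃ k, k < distance.length ∧ line < (distance.take (k+1)).sum
instance (line : Int) (distance : List Int) : Decidable (Pre_divDist line distance) := by
  unfold Pre_divDist; infer_instance

def pvWitness_divDist : Int × List Int := (7, [3, 5, 4])

def Spec_divDist (line : Int) (distance : List Int) (out : List Int) : Prop := out = divDist_alt line distance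
instance (line : Int) (distance : List Int) (out : List Int) : Decidable (Spec_divDist line distance out) := by unfold Spec_divDist; infer_instance

-- ===== CLAIM (what is proved, stated in full; the proofs are below) =====
def Claim_equal_divDist : Prop := ∀ (line : Int) (distance : List Int), Dom_divDist line distance → Pre_divDist line distance → Spec_divDist line distance (divDist line distance)

-- ===== LEMMAS AND PROOFS =====

lemma sum_take_succ (l : List Int) (i : Nat) (h : i < l.length) :
    (l.take (i+1)).sum = (l.take i).sum + l[i] := by
  rw [List.take_add_one, List.getElem?_eq_getElem h, List.sum_append]
  simp

-- A's post-loop insert/insert/del block replaces the element at index t by the pair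
-- [result[t] - (len - line), len - line]
lemma build_eq (line len : Int) (t : Nat) (l : List Int) (ht : t < l.length) :
    divDistBuild line t len l
      = l.take t ++ [l[t] - (len - line), len - line] ++ l.drop (t+1) := by
  unfold divDistBuild
  have hA : (l.take t).length = t := by simp; omega
  have hdrop : l.drop t = l[t] :: l.drop (t+1) := by
    rw [List.drop_eq_getElem_cons ht]
  rw [PySem.List.insert_natCast l t _ (le_of_lt ht)]
  have hg1 : PySem.List.pyGet? (l.take t ++ (len - line) :: l.drop t) ((t : Int) + 1)
      = some l[t] := by
    rw [show ((t : Int) + 1) = ((t + 1 : Nat) : Int) by push_cast; ring,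
        PySem.List.pyGet?_natCast,
        List.getElem?_append_right (by omega), hA, Nat.add_sub_cancel_left, hdrop]
    rfl
  have hg0 : PySem.List.pyGet? (l.take t ++ (len - line) :: l.drop t) (t : Int)
      = some (len - line) := by
    rw [PySem.List.pyGet?_natCast, List.getElem?_append_right (by omega), hA, Nat.sub_self]
    rfl
  rw [hg1, hg0]
  dsimp only
  rw [show PySem.List.insert (l.take t ++ (len - line) :: l.drop t) (t : Int)
        (l[t] - (len - line))
      = l.take t ++ (l[t] - (len - line)) :: (len - line) :: l.drop t by
    rw [PySem.List.insert_natCast _ t _ (by simp; omega)]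
    rw [List.take_left' hA, List.drop_left' hA]]
  rw [show ((t : Int) + 2) = ((t + 2 : Nat) : Int) by push_cast; ring,
      PySem.List.pop?_natCast _ _ (by simp; omega)]
  rw [List.eraseIdx_append]
  simp only [hA]
  rw [if_neg (by omega)]
  rw [show t + 2 - t = 2 by omega]
  rw [List.eraseIdx_cons_succ, List.eraseIdx_cons_succ, hdrop, List.eraseIdx_cons_zero]
  simp

-- the loop invariant: started at position i with targetIDX = i and a crossing index
-- still ahead, A's loop+build computes exactly B's scan from i with pre = sum of take i
lemma key (line : Int) (distance : List Int) :
    ∀ (m i : Nat), distance.length - i ≤ m →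
      (∃ j, i ≤ j ∧ j < distance.length ∧ line < (distance.take (j+1)).sum) →
      divDistBuild line (divDistLoop line distance i i).1 (divDistLoop line distance i i).2 distance
        = divDistAltGo line distance ((distance.take i).sum) i := by
  intro m
  induction m with
  | zero =>
    rintro i hm ⟨j, hij, hjn, -⟩
    omega
  | succ m ih =>
    rintro i hm ⟨j, hij, hjn, hjs⟩
    have hin : i < distance.length := by omega
    have hsum := sum_take_succ distance i hin
    rw [divDistLoop, if_pos hin, divDistAltGo, dif_pos hin]
    by_cases hc : line < (distance.take (i+1)).sum
    · rw [if_pos hc]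
      dsimp only
      rw [if_pos (by rw [← hsum]; exact hc)]
      rw [build_eq line _ i distance hin]
      have e1 : distance[i] - ((distance.take (i+1)).sum - line)
          = line - (distance.take i).sum := by rw [hsum]; ring
      have e2 : (distance.take (i+1)).sum - line
          = (distance.take i).sum + distance[i] - line := by rw [hsum]
      rw [e1, e2]
    · rw [if_neg hc]
      dsimp only
      rw [if_neg (by rw [← hsum]; exact hc)]
      have hji : i ≠ j := by rintro rfl; exact hc hjs
      have := ih (i+1) (by omega) ⟨j, by omega, hjn, hjs⟩
      rw [hsum] at this
      exact this

-- ===== VERDICT (by name: the statement is the Claim_ definition above) =====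
theorem divDist_spec : Claim_equal_divDist := by
  intro line distance _ hpre
  obtain ⟨k, hk, hks⟩ := hpre
  unfold Spec_divDist divDist divDist_alt
  have := key line distance distance.length 0 (by omega) ⟨k, by omega, hk, hks⟩
  simpa using this
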